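-- pv_equiv track=rewrite | github.com/PPPP98/Baekjoon | class_03/6064.py | kain
-- ===== SOURCE A (Python) =====
-- import math
--
-- def kain(M: int, N: int, x_target: int, y_target: int) -> int:
--     year = 1
--     x = y = 1
--     cycle = 0
--     LCM = (M * N) // math.gcd(M, N)
--
--     step = M
--     target = x_target
--
--     while year <= LCM:
--         if x == x_target and y == y_target:
--             return year
--         now = cycle * step + target
--
--         x = target
--         y = now % N if now % N != 0 else N
--
--         year = now
--         cycle += 1
--     return -1
-- ===== SOURCE B (Python) =====
-- import math
--
-- def kain(M: int, N: int, x_target: int, y_target: int) -> int: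
--     # CRT via modular inverse: solve k*M + x_target == y_target (mod N) directly.
--     g = math.gcd(M, N)
--     L = (M * N) // g
--     if L < 1:
--         return -1
--     if not (1 <= y_target <= N):
--         return -1
--     d = y_target - x_target
--     if d % g != 0:
--         return -1
--     m = N // g
--     k0 = ((d // g) * pow(M // g, -1, m)) % m
--     year = k0 * M + x_target
--     return year if year <= L else -1
-- ===== Notes on version B (the rewrite author's own statement) =====
-- stated objective: faster
-- what changed: Replaces A's year-by-year scan of the whole M,N-calendar cycle by solving the congruence k*M + x_target == y_target (mod N) in closed form with a modular inverse (extended Euclid via pow(.,-1,.)), then a single range check.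
-- outside the precondition, e.g. on kain(-2, -3, 1, 1): A returns 1, B returns -1; on kain(0, 0, 1, 1): A raises ZeroDivisionError, B raises ZeroDivisionError
import Mathlib
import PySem

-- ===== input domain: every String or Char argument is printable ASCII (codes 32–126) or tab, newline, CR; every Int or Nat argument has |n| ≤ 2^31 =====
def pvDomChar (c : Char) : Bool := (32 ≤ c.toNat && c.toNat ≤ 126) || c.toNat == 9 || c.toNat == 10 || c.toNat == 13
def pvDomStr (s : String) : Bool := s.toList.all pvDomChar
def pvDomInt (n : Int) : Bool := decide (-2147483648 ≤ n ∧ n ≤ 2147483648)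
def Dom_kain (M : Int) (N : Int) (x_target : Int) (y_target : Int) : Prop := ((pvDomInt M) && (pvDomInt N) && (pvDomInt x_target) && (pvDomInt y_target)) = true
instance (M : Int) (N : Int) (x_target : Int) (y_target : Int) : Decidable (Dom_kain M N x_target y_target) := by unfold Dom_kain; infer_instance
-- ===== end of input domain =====

-- B replaces A's year-by-year scan over the calendar cycle by solving the congruence
-- k*M + x_target ≡ y_target (mod N) directly with a modular inverse (extended Euclid).

-- ===== PORT A =====
-- y-update of A's loop: `now % N if now % N != 0 else N`
def kainY (N now : Int) : Int :=
  if PySem.Int.mod now N ≠ 0 then PySem.Int.mod now N else N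

-- A's while-loop; fuel only makes the recursion total (Python A diverges when M < 0 ∧ N < 0,
-- which Pre_kain excludes; inside Pre_kain the fuel chosen in `kain` is never exhausted).
def kainLoop (M N LCM x_target y_target : Int) : Nat → Int → Int → Int → Int → Int
  | 0, _, _, _, _ => -1
  | fuel+1, year, x, y, cycle =>
      if year ≤ LCM then
        if x = x_target ∧ y = y_target then year
        else
          kainLoop M N LCM x_target y_target fuel
            (cycle * M + x_target) x_target (kainY N (cycle * M + x_target)) (cycle + 1)
      else -1

def kain (M : Int) (N : Int) (x_target : Int) (y_target : Int) : Int :=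
  let LCM := PySem.Int.floordiv (M * N) ((Int.gcd M N : Int))
  kainLoop M N LCM x_target y_target ((LCM - x_target).toNat + 2) 1 1 1 0

-- ===== PORT B =====
-- pow(a, -1, m) of Source B is ported as the Bezout coefficient Int.gcdA reduced mod m
-- (the unique inverse representative in [0, m), which is exactly what pow returns).
def kain_alt (M : Int) (N : Int) (x_target : Int) (y_target : Int) : Int :=
  let g : Int := (Int.gcd M N : Int)
  let L := PySem.Int.floordiv (M * N) g
  if L < 1 then -1
  else if ¬ (1 ≤ y_target ∧ y_target ≤ N) then -1
  else
    let d := y_target - x_target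
    if PySem.Int.mod d g ≠ 0 then -1
    else
      let m := PySem.Int.floordiv N g
      let k0 := PySem.Int.mod
        (PySem.Int.floordiv d g * PySem.Int.mod (Int.gcdA (PySem.Int.floordiv M g) m) m) m
      let year := k0 * M + x_target
      if year ≤ L then year else -1

-- ===== PRECONDITION & SPEC =====
-- Pre_ excludes M < 0 ∧ N < 0, where Python A loops forever except for accidental early
-- matches, and M = 0 ∧ N = 0, where A raises ZeroDivisionError (so does B).
def Pre_kain (M : Int) (N : Int) (x_target : Int) (y_target : Int) : Prop :=
  ¬ (M < 0 ∧ N < 0) ∧ ¬ (M = 0 ∧ N = 0)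
instance (M : Int) (N : Int) (x_target : Int) (y_target : Int) : Decidable (Pre_kain M N x_target y_target) := by unfold Pre_kain; infer_instance

def pvWitness_kain : Int × Int × Int × Int := (12, 10, 3, 9)

def Spec_kain (M : Int) (N : Int) (x_target : Int) (y_target : Int) (out : Int) : Prop := out = kain_alt M N x_target y_target
instance (M : Int) (N : Int) (x_target : Int) (y_target : Int) (out : Int) : Decidable (Spec_kain M N x_target y_target out) := by unfold Spec_kain; infer_instance

-- ===== CLAIM (what is proved, stated in full; the proofs are below) =====
def Claim_equal_kain : Prop := ∀ (M : Int) (N : Int) (x_target : Int) (y_target : Int), Dom_kain M N x_target y_target → Pre_kain M N x_target y_target → Spec_kain M N x_target y_target (kain M N x_target y_target)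

-- ===== LEMMAS AND PROOFS =====

-- the match-and-in-range condition A's loop tests at cycle k+1 (k = number of M-steps taken)
def Qb (M N L xt yt : Int) (k : Nat) : Bool :=
  decide (kainY N ((k : Int) * M + xt) = yt) && decide ((k : Int) * M + xt ≤ L)

-- proof-only description of the loop's result: the first k ≥ j that matches, if any
noncomputable def searchSpec (M N L xt yt : Int) (j : Nat) : Int :=
  @dite Int (∃ k, j ≤ k ∧ Qb M N L xt yt k = true) (Classical.propDecidable _)
    (fun h => ((Nat.find h : Nat) : Int) * M + xt) (fun _ => -1)

lemma dvd_small_zero {n x : Int} (h : n ∣ x) (h1 : -n < x) (h2 : x < n) : x = 0 := by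
  rcases h with ⟨c, rfl⟩
  rcases lt_trichotomy c 0 with hc | hc | hc
  · nlinarith
  · simp [hc]
  · nlinarith

lemma kainY_match (N a yt : Int) (hN : 1 ≤ N) :
    kainY N a = yt ↔ (1 ≤ yt ∧ yt ≤ N ∧ N ∣ (a - yt)) := by
  have hNpos : (0:Int) < N := by omega
  have hmod : PySem.Int.mod a N = a % N := PySem.Int.mod_eq_emod_of_pos hNpos
  have h0 : 0 ≤ a % N := Int.emod_nonneg a (by omega)
  have h1 : a % N < N := Int.emod_lt_of_pos a hNpos
  have hdvd : N ∣ a - a % N := ⟨a / N, by rw [Int.emod_def]; ring⟩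
  unfold kainY
  rw [hmod]
  split_ifs with h
  · constructor
    · rintro rfl
      exact ⟨by omega, by omega, hdvd⟩
    · rintro ⟨hy1, hy2, hd⟩
      have hsub : N ∣ (a % N - yt) := by
        have := dvd_sub hd hdvd
        have e : (a - yt) - (a - a % N) = a % N - yt := by ring
        rwa [e] at this
      have := dvd_small_zero hsub (by omega) (by omega)
      omega
  · simp only [ne_eq, not_not] at h
    have hNa : N ∣ a := Int.dvd_of_emod_eq_zero h
    constructor
    · rintro rfl
      exact ⟨by omega, le_refl N, by
        rcases hNa with ⟨c, rfl⟩; exact ⟨c - 1, by ring⟩⟩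
    · rintro ⟨hy1, hy2, hd⟩
      have hNyt : N ∣ yt := by
        have := dvd_sub hNa hd
        have e : a - (a - yt) = yt := by ring
        rwa [e] at this
      have := Int.le_of_dvd (by omega) hNyt
      omega

lemma searchSpec_none (M N L xt yt : Int) (j : Nat)
    (h : ∀ k, j ≤ k → ¬ Qb M N L xt yt k = true) : searchSpec M N L xt yt j = -1 := by
  unfold searchSpec
  rw [dif_neg]
  rintro ⟨k, hk, hq⟩
  exact h k hk hq

lemma searchSpec_found (M N L xt yt : Int) (j k : Nat) (hjk : j ≤ k)
    (hq : Qb M N L xt yt k = true) (hmin : ∀ k', j ≤ k' → k' < k → ¬ Qb M N L xt yt k' = true) :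
    searchSpec M N L xt yt j = (k : Int) * M + xt := by
  unfold searchSpec
  have hex : ∃ k', j ≤ k' ∧ Qb M N L xt yt k' = true := ⟨k, hjk, hq⟩
  rw [dif_pos hex]
  have hfind : Nat.find hex = k := by
    rw [Nat.find_eq_iff]
    exact ⟨⟨hjk, hq⟩, fun m hm hc => hmin m hc.1 hm hc.2⟩
  rw [hfind]

lemma searchSpec_step (M N L xt yt : Int) (j : Nat)
    (h : ¬ Qb M N L xt yt j = true) :
    searchSpec M N L xt yt j = searchSpec M N L xt yt (j+1) := by
  unfold searchSpec
  by_cases h' : ∃ k, j + 1 ≤ k ∧ Qb M N L xt yt k = true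
  · obtain ⟨k, hk, hq⟩ := h'
    have hup : ∃ k, j ≤ k ∧ Qb M N L xt yt k = true := ⟨k, by omega, hq⟩
    have h'' : ∃ k, j + 1 ≤ k ∧ Qb M N L xt yt k = true := ⟨k, hk, hq⟩
    rw [dif_pos hup, dif_pos h'']
    have hne : Nat.find hup ≠ j := fun he => h (he ▸ (Nat.find_spec hup).2)
    have h1 : Nat.find hup ≤ Nat.find h'' := by
      have hs := Nat.find_spec h''
      exact Nat.find_min' hup ⟨by omega, hs.2⟩
    have h2 : Nat.find h'' ≤ Nat.find hup := by
      refine Nat.find_min' h'' ⟨?_, (Nat.find_spec hup).2⟩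
      have := (Nat.find_spec hup).1
      omega
    have : Nat.find hup = Nat.find h'' := le_antisymm h1 h2
    rw [this]
  · rw [dif_neg h', dif_neg]
    rintro ⟨k, hk, hq⟩
    rcases Nat.eq_or_lt_of_le hk with rfl | hlt
    · exact h hq
    · exact h' ⟨k, by omega, hq⟩

lemma searchSpec_over (M N L xt yt : Int) (hM : 1 ≤ M) (j : Nat)
    (hy : ¬ ((j : Int) * M + xt ≤ L)) : searchSpec M N L xt yt j = -1 := by
  apply searchSpec_none
  intro k hk hq
  simp only [Qb, Bool.and_eq_true, decide_eq_true_eq] at hq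
  have hjk : (j : Int) ≤ (k : Int) := by exact_mod_cast hk
  have : (j : Int) * M ≤ (k : Int) * M := mul_le_mul_of_nonneg_right hjk (by omega)
  omega

lemma kainLoop_eq (M N L xt yt : Int) (hM : 1 ≤ M) :
    ∀ (fuel j : Nat), (L + 1 - ((j : Int) * M + xt)).toNat ≤ fuel →
      kainLoop M N L xt yt fuel ((j : Int) * M + xt) xt (kainY N ((j : Int) * M + xt)) ((j : Int) + 1) =
        searchSpec M N L xt yt j := by
  intro fuel
  induction fuel with
  | zero =>
    intro j hj
    rw [kainLoop, searchSpec_over M N L xt yt hM j (by omega)]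
  | succ fuel ih =>
    intro j hj
    rw [kainLoop]
    by_cases hy : (j : Int) * M + xt ≤ L
    · rw [if_pos hy]
      by_cases hm : kainY N ((j : Int) * M + xt) = yt
      · rw [if_pos ⟨rfl, hm⟩]
        have hq : Qb M N L xt yt j = true := by simp [Qb, hm, hy]
        rw [searchSpec_found M N L xt yt j j (le_refl j) hq (by omega)]
      · rw [if_neg (by tauto)]
        have e1 : ((j : Int) + 1) * M + xt = ((j + 1 : Nat) : Int) * M + xt := by push_cast; ring
        have e2 : ((j : Int) + 1) + 1 = ((j + 1 : Nat) : Int) + 1 := by push_cast; ring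
        have hfuel : (L + 1 - (((j + 1 : Nat) : Int) * M + xt)).toNat ≤ fuel := by
          have hexp : ((j + 1 : Nat) : Int) * M = (j : Int) * M + M := by push_cast; ring
          rw [hexp]
          omega
        rw [e1, e2, ih (j + 1) hfuel]
        rw [searchSpec_step M N L xt yt j (by simp [Qb]; tauto)]
    · rw [if_neg hy, searchSpec_over M N L xt yt hM j hy]

lemma gcd_cast_pos (M N : Int) (hM : 1 ≤ M) : (0:Int) < (Int.gcd M N : Int) := by
  have : 0 < Int.gcd M N := Int.gcd_pos_iff.mpr (Or.inl (by omega))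
  exact_mod_cast this

lemma m_pos (M N : Int) (hM : 1 ≤ M) (hN : 1 ≤ N) :
    1 ≤ N / (Int.gcd M N : Int) := by
  have hg := gcd_cast_pos M N hM
  have hdvd : (Int.gcd M N : Int) ∣ N := Int.gcd_dvd_right M N
  have hle : (Int.gcd M N : Int) ≤ N := Int.le_of_dvd (by omega) hdvd
  rw [Int.le_ediv_iff_mul_le hg]
  omega

lemma L_eq (M N : Int) (hM : 1 ≤ M) (hN : 1 ≤ N) :
    PySem.Int.floordiv (M * N) ((Int.gcd M N : Int)) = M * (N / (Int.gcd M N : Int)) := by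
  have hg := gcd_cast_pos M N hM
  rw [PySem.Int.floordiv_eq_ediv_of_pos hg]
  exact Int.mul_ediv_assoc M (Int.gcd_dvd_right M N)

lemma L_ge_one (M N : Int) (hM : 1 ≤ M) (hN : 1 ≤ N) :
    1 ≤ PySem.Int.floordiv (M * N) ((Int.gcd M N : Int)) := by
  rw [L_eq M N hM hN]
  have := m_pos M N hM hN
  nlinarith

lemma kainY_one (N : Int) (hN : 1 ≤ N) : kainY N 1 = 1 := by
  unfold kainY
  rw [PySem.Int.mod_eq_emod_of_pos (by omega)]
  by_cases h : N = 1
  · subst h; norm_num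
  · rw [Int.emod_eq_of_lt (by omega) (by omega)]
    norm_num


lemma kain_eq_search (M N xt yt : Int) (hM : 1 ≤ M) (hN : 1 ≤ N) :
    kain M N xt yt =
      searchSpec M N (PySem.Int.floordiv (M * N) ((Int.gcd M N : Int))) xt yt 0 := by
  have hL1 := L_ge_one M N hM hN
  set L : Int := PySem.Int.floordiv (M * N) ((Int.gcd M N : Int)) with hLdef
  show kainLoop M N L xt yt ((L - xt).toNat + 2) 1 1 1 0 = _
  rw [show (L - xt).toNat + 2 = ((L - xt).toNat + 1) + 1 from rfl, kainLoop, if_pos hL1]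
  by_cases h11 : (1 : Int) = xt ∧ (1 : Int) = yt
  · rw [if_pos h11]
    obtain ⟨hx1, hy1⟩ := h11
    have hq : Qb M N L xt yt 0 = true := by
      simp only [Qb, Bool.and_eq_true, decide_eq_true_eq, Nat.cast_zero, zero_mul, zero_add]
      rw [← hx1, ← hy1]
      exact ⟨kainY_one N hN, by omega⟩
    rw [searchSpec_found M N L xt yt 0 0 (le_refl 0) hq (by omega)]
    push_cast
    omega
  · rw [if_neg h11]
    have e0 : (0 : Int) * M + xt = ((0 : Nat) : Int) * M + xt := by norm_num
    have e1 : (0 : Int) + 1 = ((0 : Nat) : Int) + 1 := by norm_num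
    rw [e0, e1, kainLoop_eq M N L xt yt hM ((L - xt).toNat + 1) 0 (by push_cast; omega)]

-- linear-algebraic core: with g ∣ d, the solutions k of N ∣ k*M - d are exactly k ≡ k0 (mod N/g)
lemma cong_key (M N d k : Int) (hM : 1 ≤ M) (hN : 1 ≤ N) (hgd : (Int.gcd M N : Int) ∣ d) :
    N ∣ (k * M - d) ↔
      (N / (Int.gcd M N : Int)) ∣
        (k - (d / (Int.gcd M N : Int) *
              ((Int.gcdA (M / (Int.gcd M N : Int)) (N / (Int.gcd M N : Int))) % (N / (Int.gcd M N : Int)))) % (N / (Int.gcd M N : Int))) := by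
  have hg : (0:Int) < (Int.gcd M N : Int) := gcd_cast_pos M N hM
  set g : Int := (Int.gcd M N : Int) with hgdef
  set M' : Int := M / g with hM'def
  set m : Int := N / g with hmdef
  set d' : Int := d / g with hd'def
  set u : Int := Int.gcdA M' m with hudef
  set B : Int := Int.gcdB M' m with hBdef
  set k0 : Int := (d' * (u % m)) % m with hk0def
  have hMf : g * M' = M := Int.mul_ediv_cancel' (Int.gcd_dvd_left M N)
  have hNf : g * m = N := Int.mul_ediv_cancel' (Int.gcd_dvd_right M N)
  have hdf : g * d' = d := Int.mul_ediv_cancel' hgd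
  have hcop : Int.gcd M' m = 1 := by
    have hpos : 0 < Int.gcd M N := Int.gcd_pos_iff.mpr (Or.inl (by omega))
    exact Int.gcd_div_gcd_div_gcd hpos
  have hbez : (1 : Int) = M' * u + m * B := by
    have := Int.gcd_eq_gcd_ab M' m
    rw [hcop] at this
    exact_mod_cast this
  have e1 : ∀ x : Int, m ∣ (x % m - x) := fun x => ⟨-(x / m), by rw [Int.emod_def]; ring⟩
  have hk00 : m ∣ (k0 - d' * u) := by
    have h1 : m ∣ (k0 - d' * (u % m)) := e1 _
    have h2 : m ∣ (d' * (u % m) - d' * u) := by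
      have := (e1 u).mul_left d'
      have e : d' * (u % m - u) = d' * (u % m) - d' * u := by ring
      rwa [e] at this
    have := dvd_add h1 h2
    have e : (k0 - d' * (u % m)) + (d' * (u % m) - d' * u) = k0 - d' * u := by ring
    rwa [e] at this
  constructor
  · rintro ⟨c, hc⟩
    -- k*M - d = N*c, i.e. g*(k*M' - d') = g*m*c, so k*M' - d' = m*c
    have hc' : k * M' - d' = m * c := by
      have hgne : g ≠ 0 := by omega
      apply mul_left_cancel₀ hgne
      rw [show g * (k * M' - d') = k * (g * M') - g * d' from by ring, hMf, hdf,
        show g * (m * c) = (g * m) * c from by ring, hNf]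
      exact hc
    obtain ⟨e, he⟩ := hk00
    exact ⟨u * c + k * B - e, by linear_combination u * hc' - he + k * hbez⟩
  · rintro ⟨c, hc⟩
    obtain ⟨e, he⟩ := hk00
    have : k * M' - d' = m * (M' * c + M' * e - d' * B) := by
      linear_combination M' * hc + M' * he - d' * hbez
    refine ⟨M' * c + M' * e - d' * B, ?_⟩
    rw [show k * M - d = g * (k * M' - d') from by rw [← hMf, ← hdf]; ring, this, ← hNf]
    ring

lemma kain_alt_eq_search (M N xt yt : Int) (hM : 1 ≤ M) (hN : 1 ≤ N) :
    kain_alt M N xt yt =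
      searchSpec M N (PySem.Int.floordiv (M * N) ((Int.gcd M N : Int))) xt yt 0 := by
  have hg : (0:Int) < (Int.gcd M N : Int) := gcd_cast_pos M N hM
  have hm1 : 1 ≤ N / (Int.gcd M N : Int) := m_pos M N hM hN
  have hL1 : 1 ≤ PySem.Int.floordiv (M * N) ((Int.gcd M N : Int)) := L_ge_one M N hM hN
  simp only [kain_alt]
  rw [if_neg (by omega)]
  by_cases hyt : 1 ≤ yt ∧ yt ≤ N
  · rw [if_neg (by tauto)]
    by_cases hdg : (Int.gcd M N : Int) ∣ (yt - xt)
    · rw [if_neg (by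
        rw [PySem.Int.mod_eq_emod_of_pos hg]
        simp [Int.emod_eq_zero_of_dvd hdg])]
      rw [PySem.Int.floordiv_eq_ediv_of_pos hg, PySem.Int.floordiv_eq_ediv_of_pos hg,
        PySem.Int.floordiv_eq_ediv_of_pos hg,
        PySem.Int.mod_eq_emod_of_pos (by omega), PySem.Int.mod_eq_emod_of_pos (by omega)]
      set m : Int := N / (Int.gcd M N : Int) with hmdef
      set K0 : Int := ((yt - xt) / (Int.gcd M N : Int) *
        ((Int.gcdA (M / (Int.gcd M N : Int)) m) % m)) % m with hK0def
      have hK0nonneg : 0 ≤ K0 := Int.emod_nonneg _ (by omega)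
      have hK0lt : K0 < m := Int.emod_lt_of_pos _ (by omega)
      have hkey : ∀ k : Int, N ∣ (k * M + xt - yt) ↔ m ∣ (k - K0) := by
        intro k
        have := cong_key M N (yt - xt) k hM hN hdg
        rw [show k * M - (yt - xt) = k * M + xt - yt from by ring] at this
        exact this
      by_cases hin : K0 * M + xt ≤ PySem.Int.floordiv (M * N) ((Int.gcd M N : Int))
      · rw [if_pos hin]
        symm
        have hcast : ((K0.toNat : Nat) : Int) = K0 := Int.toNat_of_nonneg hK0nonneg
        have hq : Qb M N (PySem.Int.floordiv (M * N) ((Int.gcd M N : Int))) xt yt K0.toNat = true := by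
          simp only [Qb, Bool.and_eq_true, decide_eq_true_eq]
          rw [hcast]
          refine ⟨(kainY_match N (K0 * M + xt) yt hN).mpr ⟨hyt.1, hyt.2, ?_⟩, hin⟩
          exact (hkey K0).mpr (by simp)
        rw [searchSpec_found M N _ xt yt 0 K0.toNat (Nat.zero_le _) hq ?_]
        · rw [hcast]
        · intro k' _ hlt hq'
          simp only [Qb, Bool.and_eq_true, decide_eq_true_eq] at hq'
          have hdvd := (hkey (k' : Int)).mp
            (((kainY_match N ((k' : Int) * M + xt) yt hN).mp hq'.1).2.2)
          have hk'lt : (k' : Int) < K0 := by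
            have : (k' : Int) < ((K0.toNat : Nat) : Int) := by exact_mod_cast hlt
            omega
          have hk'0 : (0:Int) ≤ (k' : Int) := Int.natCast_nonneg k'
          have := dvd_small_zero hdvd (by omega) (by omega)
          omega
      · rw [if_neg hin]
        symm
        apply searchSpec_none
        intro k _ hq
        simp only [Qb, Bool.and_eq_true, decide_eq_true_eq] at hq
        have hdvd := (hkey (k : Int)).mp
          (((kainY_match N ((k : Int) * M + xt) yt hN).mp hq.1).2.2)
        have hk0 : (0:Int) ≤ (k : Int) := Int.natCast_nonneg k
        have hge : K0 ≤ (k : Int) := by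
          by_contra hcon
          have := dvd_small_zero hdvd (by omega) (by omega)
          omega
        have : K0 * M ≤ (k : Int) * M := mul_le_mul_of_nonneg_right hge (by omega)
        omega
    · rw [if_pos (by
        rw [PySem.Int.mod_eq_emod_of_pos hg]
        intro h
        exact hdg (Int.dvd_of_emod_eq_zero h))]
      symm
      apply searchSpec_none
      intro k _ hq
      simp only [Qb, Bool.and_eq_true, decide_eq_true_eq] at hq
      have hNdvd := ((kainY_match N ((k : Int) * M + xt) yt hN).mp hq.1).2.2
      apply hdg
      have hgN : (Int.gcd M N : Int) ∣ ((k : Int) * M + xt - yt) :=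
        dvd_trans (Int.gcd_dvd_right M N) hNdvd
      have hgkM : (Int.gcd M N : Int) ∣ (k : Int) * M := (Int.gcd_dvd_left M N).mul_left _
      have := dvd_sub hgN hgkM
      have e : ((k : Int) * M + xt - yt) - (k : Int) * M = -(yt - xt) := by ring
      rw [e] at this
      exact (dvd_neg).mp this
  · rw [if_pos hyt]
    symm
    apply searchSpec_none
    intro k _ hq
    simp only [Qb, Bool.and_eq_true, decide_eq_true_eq] at hq
    have := (kainY_match N ((k : Int) * M + xt) yt hN).mp hq.1
    exact hyt ⟨this.1, this.2.1⟩

lemma degenerate_L (M N : Int) (hnb : ¬ (M < 0 ∧ N < 0)) (hnz : ¬ (M = 0 ∧ N = 0))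
    (hnot : ¬ (1 ≤ M ∧ 1 ≤ N)) :
    PySem.Int.floordiv (M * N) ((Int.gcd M N : Int)) < 1 := by
  have hg : (0:Int) < (Int.gcd M N : Int) := by
    have : M ≠ 0 ∨ N ≠ 0 := by tauto
    exact_mod_cast Int.gcd_pos_iff.mpr this
  rw [PySem.Int.floordiv_eq_ediv_of_pos hg]
  by_cases hM0 : M = 0
  · subst hM0; simp
  · by_cases hN0 : N = 0
    · subst hN0; simp
    · have hMN : M * N < 0 := by
        rcases lt_trichotomy M 0 with hM | hM | hM
        · have hN : 0 < N := by rcases lt_trichotomy N 0 with h | h | h <;> [exact absurd ⟨hM, h⟩ hnb; exact absurd h hN0; exact h]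
          exact mul_neg_of_neg_of_pos hM hN
        · exact absurd hM hM0
        · have hN : N < 0 := by
            rcases lt_trichotomy N 0 with h | h | h <;> [exact h; exact absurd h hN0; exact absurd ⟨by omega, by omega⟩ hnot]
          exact mul_neg_of_pos_of_neg hM hN
      have := Int.ediv_neg_of_neg_of_pos hMN hg
      omega

lemma kain_of_L_lt (M N xt yt : Int)
    (hL : PySem.Int.floordiv (M * N) ((Int.gcd M N : Int)) < 1) :
    kain M N xt yt = -1 := by
  show kainLoop M N _ xt yt (_ + 2) 1 1 1 0 = -1
  rw [show ((PySem.Int.floordiv (M * N) ((Int.gcd M N : Int)) - xt).toNat + 2)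
      = ((PySem.Int.floordiv (M * N) ((Int.gcd M N : Int)) - xt).toNat + 1) + 1 from rfl,
    kainLoop]
  rw [if_neg (by omega)]

lemma kain_alt_of_L_lt (M N xt yt : Int)
    (hL : PySem.Int.floordiv (M * N) ((Int.gcd M N : Int)) < 1) :
    kain_alt M N xt yt = -1 := by
  simp only [kain_alt]
  rw [if_pos hL]

-- ===== VERDICT (by name: the statement is the Claim_ definition above) =====
theorem kain_spec : Claim_equal_kain := by
  intro M N xt yt _ hPre
  unfold Spec_kain
  by_cases hMN : 1 ≤ M ∧ 1 ≤ N
  · rw [kain_eq_search M N xt yt hMN.1 hMN.2, kain_alt_eq_search M N xt yt hMN.1 hMN.2]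
  · have hL := degenerate_L M N hPre.1 hPre.2 hMN
    rw [kain_of_L_lt M N xt yt hL, kain_alt_of_L_lt M N xt yt hL]
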